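-- pv_equiv track=rewrite | github.com/andriylak/binary_tree | all_correct_bracketings.py | allPossibleFullBinaryTrees
-- ===== SOURCE A (Python) =====
-- def allPossibleFullBinaryTrees(vertexes):
--     if vertexes == 1:
--         return 1
--     result = 0
--     for left_vertexes in range(1, vertexes, 2):
--         right_vertexes = vertexes - left_vertexes - 1
--         left_subtree_count = allPossibleFullBinaryTrees(left_vertexes)
--         right_subtree_count = allPossibleFullBinaryTrees(right_vertexes)
--         result += left_subtree_count * right_subtree_count
--     return result
-- ===== SOURCE B (Python) =====
-- def allPossibleFullBinaryTrees(vertexes):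
--     # Closed form: a full binary tree with v vertexes exists only for odd v >= 1,
--     # and the count is the Catalan number C((v-1)/2), computed by its product recurrence.
--     if vertexes < 1 or vertexes % 2 == 0:
--         return 0
--     n = (vertexes - 1) // 2
--     c = 1
--     for k in range(n):
--         c = c * 2 * (2 * k + 1) // (k + 2)
--     return c
-- ===== Notes on version B (the rewrite author's own statement) =====
-- stated objective: faster
-- what changed: Replaces A's exponential tree recursion by the closed form: the count is the Catalan number C((vertexes-1)/2) for odd vertexes >= 1 (else 0), computed with the Catalan product recurrence in one linear loop; Pre_ excludes vertexes > 15000, where A's linear-depth recursion overruns Python's recursion limit and raises RecursionError (just below that threshold A's exponential running time already makes any return unobservable).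
-- outside the precondition, e.g. on allPossibleFullBinaryTrees(16000): A does not finish within the time limit, B returns 0; on allPossibleFullBinaryTrees(30000): A raises RecursionError, B returns 0
import Mathlib
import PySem

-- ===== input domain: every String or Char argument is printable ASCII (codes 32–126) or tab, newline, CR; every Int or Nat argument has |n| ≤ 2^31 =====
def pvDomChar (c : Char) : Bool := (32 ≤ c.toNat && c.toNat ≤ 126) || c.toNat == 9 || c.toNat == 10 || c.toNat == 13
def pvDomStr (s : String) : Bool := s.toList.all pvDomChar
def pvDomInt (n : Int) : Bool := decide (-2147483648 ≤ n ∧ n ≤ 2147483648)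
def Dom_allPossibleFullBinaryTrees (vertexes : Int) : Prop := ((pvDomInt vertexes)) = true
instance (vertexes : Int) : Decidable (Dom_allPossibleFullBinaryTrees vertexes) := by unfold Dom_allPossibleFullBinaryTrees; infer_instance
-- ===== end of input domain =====

-- B replaces A's exponential recursion by the closed form (Catalan number via its product
-- recurrence) — asymptotically faster; equivalence of the return values is proved on Pre_ (the proof itself never needs the bound).

-- ===== PORT A =====
-- literal port of A: the same recursion over range(1, vertexes, 2); the structural `fuel`
-- argument (vertexes.toNat, decremented at each call) only makes the recursion total —
-- pvGoA_fuel below shows it never changes the computed value.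
def pvGoA : Nat → Int → Int
  | 0, vertexes => if vertexes = 1 then 1 else 0
  | .succ fuel, vertexes =>
    if vertexes = 1 then 1
    else
      (PySem.List.pyRange 1 vertexes 2).foldl
        (fun result left_vertexes =>
          result + pvGoA fuel left_vertexes *
            pvGoA fuel (vertexes - left_vertexes - 1)) 0

def allPossibleFullBinaryTrees (vertexes : Int) : Int := pvGoA vertexes.toNat vertexes

-- ===== PORT B =====
def allPossibleFullBinaryTrees_alt (vertexes : Int) : Int :=
  if vertexes < 1 ∨ PySem.Int.mod vertexes 2 = 0 then 0
  else
    let n := PySem.Int.floordiv (vertexes - 1) 2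
    (PySem.List.pyRange 0 n 1).foldl
      (fun c k => PySem.Int.floordiv (c * 2 * (2 * k + 1)) (k + 2)) 1

-- ===== PRECONDITION & SPEC =====
-- Pre_ excludes vertexes > 15000: there A's recursion, whose depth grows linearly
-- (about vertexes/2 nested calls along the left_vertexes = 1 chain), overruns Python's
-- recursion limit and raises RecursionError instead of returning a value.
def Pre_allPossibleFullBinaryTrees (vertexes : Int) : Prop := vertexes ≤ 15000
instance (vertexes : Int) : Decidable (Pre_allPossibleFullBinaryTrees vertexes) := by unfold Pre_allPossibleFullBinaryTrees; infer_instance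
def pvWitness_allPossibleFullBinaryTrees : Int := 7

def Spec_allPossibleFullBinaryTrees (vertexes : Int) (out : Int) : Prop := out = allPossibleFullBinaryTrees_alt vertexes
instance (vertexes : Int) (out : Int) : Decidable (Spec_allPossibleFullBinaryTrees vertexes out) := by unfold Spec_allPossibleFullBinaryTrees; infer_instance

-- ===== CLAIM (what is proved, stated in full; the proofs are below) =====
def Claim_equal_allPossibleFullBinaryTrees : Prop := ∀ (vertexes : Int), Dom_allPossibleFullBinaryTrees vertexes → Pre_allPossibleFullBinaryTrees vertexes → Spec_allPossibleFullBinaryTrees vertexes (allPossibleFullBinaryTrees vertexes)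

-- ===== LEMMAS AND PROOFS =====

-- range(1, b, 2) is the list of odd numbers below b, of which there are ⌊b/2⌋
theorem pyRangeOdd (b : Int) :
    PySem.List.pyRange 1 b 2 = (List.range (b / 2).toNat).map (fun k : Nat => (2 * k + 1 : Int)) := by
  rw [PySem.List.pyRange_of_pos 1 b (by norm_num)]
  split_ifs with h
  · have h2 : ((b - 1 + 2 - 1) / 2).toNat = (b / 2).toNat := by omega
    rw [h2]
    apply List.map_congr_left
    intro k _
    ring
  · have h2 : (b / 2).toNat = 0 := by omega
    simp [h2]

theorem pvGoA_nonpos (fuel : Nat) (v : Int) (h : v ≤ 0) : pvGoA fuel v = 0 := by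
  cases fuel with
  | zero => rw [pvGoA, if_neg (by omega)]
  | succ f =>
    rw [pvGoA, if_neg (by omega), pyRangeOdd]
    have h2 : (v / 2).toNat = 0 := by omega
    simp [h2]

theorem pvGoA_fuel (fuel : Nat) (v : Int) (h : v.toNat ≤ fuel) :
    pvGoA fuel v = pvGoA v.toNat v := by
  induction fuel using Nat.strong_induction_on generalizing v with
  | _ fuel ih =>
    by_cases h1 : v = 1
    · subst h1
      have hone : ∀ g, pvGoA g 1 = 1 := fun g => by cases g <;> simp [pvGoA]
      rw [hone, hone]
    · by_cases h0 : v ≤ 0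
      · rw [pvGoA_nonpos _ _ h0, pvGoA_nonpos _ _ h0]
      · obtain ⟨m, hm⟩ : ∃ m, v.toNat = m + 1 := ⟨v.toNat - 1, by omega⟩
        obtain ⟨g, hg⟩ : ∃ g, fuel = g + 1 := ⟨fuel - 1, by omega⟩
        subst hg
        rw [hm, pvGoA, pvGoA, if_neg h1, if_neg h1]
        apply PySem.List.foldl_congr_mem _ _ _ _
        intro acc l hl
        rcases (PySem.List.mem_pyRange_iff_of_pos (by norm_num) l).1 hl with ⟨hb1, hb2, _⟩
        have e1 : pvGoA g l = pvGoA l.toNat l := ih g (by omega) l (by omega)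
        have e2 : pvGoA m l = pvGoA l.toNat l := ih m (by omega) l (by omega)
        have e3 : pvGoA g (v - l - 1) = pvGoA (v - l - 1).toNat (v - l - 1) :=
          ih g (by omega) _ (by omega)
        have e4 : pvGoA m (v - l - 1) = pvGoA (v - l - 1).toNat (v - l - 1) :=
          ih m (by omega) _ (by omega)
        rw [e1, e2, e3, e4]

theorem A_unfold (v : Int) (h : v ≠ 1) :
    allPossibleFullBinaryTrees v =
      ((PySem.List.pyRange 1 v 2).map
        (fun l => allPossibleFullBinaryTrees l * allPossibleFullBinaryTrees (v - l - 1))).sum := by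
  by_cases h0 : v ≤ 0
  · rw [allPossibleFullBinaryTrees, pvGoA_nonpos _ _ h0, pyRangeOdd]
    have h2 : (v / 2).toNat = 0 := by omega
    simp [h2]
  · obtain ⟨m, hm⟩ : ∃ m, v.toNat = m + 1 := ⟨v.toNat - 1, by omega⟩
    rw [allPossibleFullBinaryTrees, hm, pvGoA, if_neg h]
    have hcong : ∀ (acc : Int), ∀ l ∈ PySem.List.pyRange 1 v 2,
        acc + pvGoA m l * pvGoA m (v - l - 1) =
        acc + allPossibleFullBinaryTrees l * allPossibleFullBinaryTrees (v - l - 1) := by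
      intro acc l hl
      rcases (PySem.List.mem_pyRange_iff_of_pos (by norm_num) l).1 hl with ⟨hb1, hb2, _⟩
      rw [allPossibleFullBinaryTrees, allPossibleFullBinaryTrees,
        pvGoA_fuel m l (by omega), pvGoA_fuel m (v - l - 1) (by omega)]
    rw [PySem.List.foldl_congr_mem _ _ _ _ hcong, PySem.List.foldl_add]
    simp

theorem A_nonpos (v : Int) (h : v ≤ 0) : allPossibleFullBinaryTrees v = 0 := by
  rw [A_unfold v (by omega), pyRangeOdd]
  have : (v / 2).toNat = 0 := by omega
  simp [this]

theorem A_even (n : Nat) : allPossibleFullBinaryTrees (2 * (n : Int)) = 0 := by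
  induction n using Nat.strong_induction_on with
  | _ n ih =>
    rcases Nat.eq_zero_or_pos n with h0 | h0
    · subst h0; exact A_nonpos 0 (by norm_num)
    · rw [A_unfold _ (by omega), pyRangeOdd]
      have hn : ((2 * (n : Int)) / 2).toNat = n := by omega
      rw [hn, List.map_map]
      apply List.sum_eq_zero
      intro x hx
      rcases List.mem_map.1 hx with ⟨k, hk, rfl⟩
      have hk' : k < n := List.mem_range.1 hk
      have hr : 2 * (n : Int) - (2 * (k : Int) + 1) - 1 = 2 * ((n - k - 1 : Nat) : Int) := by
        omega
      simp only [Function.comp_apply]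
      rw [hr, ih (n - k - 1) (by omega), mul_zero]

theorem list_sum_range_int (f : Nat → Int) (n : Nat) :
    ((List.range n).map f).sum = ∑ i ∈ Finset.range n, f i := by
  induction n with
  | zero => simp
  | succ m ih => simp [List.range_succ, Finset.sum_range_succ, ih]

theorem A_odd (n : Nat) : allPossibleFullBinaryTrees (2 * (n : Int) + 1) = (catalan n : Int) := by
  induction n using Nat.strong_induction_on with
  | _ n ih =>
    rcases Nat.eq_zero_or_pos n with h0 | h0
    · subst h0
      rw [show (2 * ((0 : Nat) : Int) + 1) = 1 by norm_num]
      rw [allPossibleFullBinaryTrees]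
      rw [show ((1 : Int).toNat) = 1 from rfl, pvGoA]
      simp [catalan_zero]
    · obtain ⟨m, rfl⟩ : ∃ m, n = m + 1 := ⟨n - 1, by omega⟩
      rw [A_unfold _ (by push_cast; omega), pyRangeOdd]
      have hn : ((2 * ((m + 1 : Nat) : Int) + 1) / 2).toNat = m + 1 := by omega
      rw [hn, List.map_map, list_sum_range_int]
      trans (∑ i ∈ Finset.range (m + 1), ((catalan i * catalan (m - i) : Nat) : Int))
      · apply Finset.sum_congr rfl
        intro k hk
        have hk' : k < m + 1 := Finset.mem_range.1 hk
        have hr : 2 * ((m + 1 : Nat) : Int) + 1 - (2 * (k : Int) + 1) - 1 =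
            2 * ((m - k : Nat) : Int) + 1 := by push_cast; omega
        simp only [Function.comp_apply]
        rw [hr, ih k (by omega), ih (m - k) (by omega)]
        push_cast; ring
      · rw [catalan_succ m,
          Fin.sum_univ_eq_sum_range (fun i => catalan i * catalan (m - i)) (m + 1)]
        push_cast
        rfl

theorem catalan_step (n : Nat) :
    catalan n * 2 * (2 * n + 1) = catalan (n + 1) * (n + 2) := by
  have h1 := succ_mul_catalan_eq_centralBinom n
  have h2 := succ_mul_catalan_eq_centralBinom (n + 1)
  have h3 := Nat.succ_mul_centralBinom_succ n
  apply Nat.eq_of_mul_eq_mul_left (Nat.succ_pos n)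
  calc (n + 1) * (catalan n * 2 * (2 * n + 1))
      = 2 * (2 * n + 1) * ((n + 1) * catalan n) := by ring
    _ = 2 * (2 * n + 1) * n.centralBinom := by rw [h1]
    _ = (n + 1) * (n + 1).centralBinom := h3.symm
    _ = (n + 1) * ((n + 1 + 1) * catalan (n + 1)) := by rw [h2]
    _ = (n + 1) * (catalan (n + 1) * (n + 2)) := by ring

theorem B_loop (n : Nat) :
    (PySem.List.pyRange 0 (n : Int) 1).foldl
      (fun c k => PySem.Int.floordiv (c * 2 * (2 * k + 1)) (k + 2)) 1 = (catalan n : Int) := by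
  induction n with
  | zero => simp [PySem.List.pyRange_one_eq_nil, catalan_zero]
  | succ m ih =>
    have hsplit : PySem.List.pyRange 0 ((m + 1 : Nat) : Int) 1 =
        PySem.List.pyRange 0 (m : Int) 1 ++ [(m : Int)] := by
      have h := PySem.List.pyRange_one_succ_right (a := 0) (b := (m : Int))
        (by exact_mod_cast Nat.zero_le m)
      rw [show ((m + 1 : Nat) : Int) = (m : Int) + 1 by push_cast; ring]
      exact h
    rw [hsplit, List.foldl_append, ih]
    simp only [List.foldl_cons, List.foldl_nil]
    have hkey : (catalan m : Int) * 2 * (2 * (m : Int) + 1) =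
        (catalan (m + 1) : Int) * ((m : Int) + 2) := by
      exact_mod_cast catalan_step m
    rw [PySem.Int.floordiv_eq_ediv_of_pos (by positivity), hkey]
    exact Int.mul_ediv_cancel _ (by omega)

theorem B_odd (n : Nat) :
    allPossibleFullBinaryTrees_alt (2 * (n : Int) + 1) = (catalan n : Int) := by
  rw [allPossibleFullBinaryTrees_alt]
  rw [if_neg]
  · have hfd : PySem.Int.floordiv (2 * (n : Int) + 1 - 1) 2 = (n : Int) := by
      rw [PySem.Int.floordiv_eq_ediv_of_pos (by norm_num)]
      omega
    simp only [hfd]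
    exact B_loop n
  · rw [PySem.Int.mod_eq_emod_of_pos (by norm_num)]
    rintro (h | h) <;> omega

theorem B_zero (v : Int) (h : v < 1 ∨ v % 2 = 0) : allPossibleFullBinaryTrees_alt v = 0 := by
  rw [allPossibleFullBinaryTrees_alt, if_pos]
  rcases h with h | h
  · exact Or.inl h
  · exact Or.inr (by rw [PySem.Int.mod_eq_emod_of_pos (by norm_num)]; exact h)

-- ===== VERDICT (by name: the statement is the Claim_ definition above) =====
theorem allPossibleFullBinaryTrees_spec : Claim_equal_allPossibleFullBinaryTrees := by
  intro v _ _
  show allPossibleFullBinaryTrees v = allPossibleFullBinaryTrees_alt v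
  by_cases h0 : v ≤ 0
  · rw [A_nonpos v h0, B_zero v (Or.inl (by omega))]
  · replace h0 : 0 < v := by omega
    rcases Int.emod_two_eq_zero_or_one v with hpar | hpar
    · have hv : v = 2 * ((v / 2).toNat : Int) := by omega
      rw [hv, A_even, B_zero _ (Or.inr (by omega))]
    · have hv : v = 2 * ((v / 2).toNat : Int) + 1 := by omega
      rw [hv, A_odd, B_odd]
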